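-- pv_equiv track=rewrite | github.com/drijks/Teigernfaces | teigernfaces3.py | makeimg5
-- ===== SOURCE A (Python) =====
-- def makeimg5(d):
--     matty=[]
--     h=len(d)
--     w=len(d[0])
--     for i in range(w):
--         matty.append([])
--         for j in range(h):
--             matty[i].append((max(min(int((d[j][i][0])+100),255),0), max(min(int((d[j][i][1])+100),255),0), max(min(int((d[j][i][2])+100),255),0), 255))
--     return matty
-- ===== SOURCE B (Python) =====
-- def makeimg5(d):
--     def clamp(c):
--         return max(min(int(c) + 100, 255), 0)
--     bright = [[(clamp(r), clamp(g), clamp(b), 255) for (r, g, b) in row] for row in d]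
--     return [list(col) for col in zip(*bright)]
-- ===== Notes on version B (the rewrite author's own statement) =====
-- stated objective: idiomatic
-- what changed: A builds the transposed image directly with nested index loops over range(w)/range(h); B first maps the clamp over the rows in their original orientation and then transposes once with zip(*bright), removing all index arithmetic.
import Mathlib
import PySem

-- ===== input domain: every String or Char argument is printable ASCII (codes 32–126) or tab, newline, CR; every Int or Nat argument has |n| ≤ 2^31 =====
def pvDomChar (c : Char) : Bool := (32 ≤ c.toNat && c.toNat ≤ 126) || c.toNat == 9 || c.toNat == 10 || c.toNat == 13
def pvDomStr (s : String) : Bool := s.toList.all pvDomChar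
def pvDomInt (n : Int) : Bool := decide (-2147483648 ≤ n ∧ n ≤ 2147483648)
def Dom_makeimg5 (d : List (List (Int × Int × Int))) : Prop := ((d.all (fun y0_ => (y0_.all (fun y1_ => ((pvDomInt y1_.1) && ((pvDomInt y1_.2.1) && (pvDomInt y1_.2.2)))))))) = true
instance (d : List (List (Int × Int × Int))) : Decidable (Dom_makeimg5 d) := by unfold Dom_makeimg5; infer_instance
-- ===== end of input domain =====

-- B brightens the rows in their original orientation and transposes once with zip(*bright),
-- replacing A's nested index loops; same cost, more idiomatic.

-- ===== PORT A =====
def makeimg5 (d : List (List (Int × Int × Int))) : List (List (Int × Int × Int × Int)) :=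
  let h : Int := (d.length : Int)
  let w : Int := ((PySem.List.pyGetD d 0 []).length : Int)
  (PySem.List.pyRange 0 w 1).foldl
    (fun matty i =>
      matty ++ [(PySem.List.pyRange 0 h 1).foldl
        (fun row j =>
          let p := PySem.List.pyGetD (PySem.List.pyGetD d j []) i (0, 0, 0)
          row ++ [(max (min (p.1 + 100) 255) 0, max (min (p.2.1 + 100) 255) 0,
                   max (min (p.2.2 + 100) 255) 0, (255 : Int))]) []]) []

-- ===== PORT B =====
def pvClamp (c : Int) : Int := max (min (c + 100) 255) 0

-- Python's zip(*ls): take heads while every list is nonempty (exact for lists of quadruples).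
def pvZipStar (ls : List (List (Int × Int × Int × Int))) : List (List (Int × Int × Int × Int)) :=
  if h : ls = [] ∨ ls.any List.isEmpty then []
  else (ls.map fun r => r.headD (0, 0, 0, 0)) :: pvZipStar (ls.map (List.drop 1))
termination_by (ls.headD []).length
decreasing_by
  push Not at h
  obtain ⟨h1, h2⟩ := h
  cases ls with
  | nil => exact absurd rfl h1
  | cons x t =>
      simp only [List.any_cons, Bool.or_eq_true] at h2
      cases x with
      | nil => simp at h2
      | cons a s => simp [List.headD]

def makeimg5_alt (d : List (List (Int × Int × Int))) : List (List (Int × Int × Int × Int)) :=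
  pvZipStar (d.map fun row => row.map fun p => (pvClamp p.1, pvClamp p.2.1, pvClamp p.2.2, (255 : Int)))

-- ===== PRECONDITION & SPEC =====
-- Pre_ excludes exactly the inputs on which A raises IndexError: the empty image (d[0])
-- and images whose first row is longer than some later row (d[j][i]).
def Pre_makeimg5 (d : List (List (Int × Int × Int))) : Prop :=
  d ≠ [] ∧ ∀ row ∈ d, (d.headD []).length ≤ row.length
instance (d : List (List (Int × Int × Int))) : Decidable (Pre_makeimg5 d) := by
  unfold Pre_makeimg5; infer_instance

def pvWitness_makeimg5 : (List (List (Int × Int × Int))) := [[(1, 2, 3)], [(4, 5, 6)]]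

def Spec_makeimg5 (d : List (List (Int × Int × Int))) (out : List (List (Int × Int × Int × Int))) : Prop := out = makeimg5_alt d
instance (d : List (List (Int × Int × Int))) (out : List (List (Int × Int × Int × Int))) : Decidable (Spec_makeimg5 d out) := by unfold Spec_makeimg5; infer_instance

-- ===== CLAIM (what is proved, stated in full; the proofs are below) =====
def Claim_equal_makeimg5 : Prop := ∀ (d : List (List (Int × Int × Int))), Dom_makeimg5 d → Pre_makeimg5 d → Spec_makeimg5 d (makeimg5 d)

-- ===== LEMMAS AND PROOFS =====

-- A in closed form: the column list, indexed by k < w.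
theorem makeimg5_eq_cols (d : List (List (Int × Int × Int))) (hne : d ≠ []) :
    makeimg5 d = (List.range (d.headD []).length).map
      (fun k => d.map (fun row =>
        let p := row.getD k (0, 0, 0)
        (max (min (p.1 + 100) 255) 0, max (min (p.2.1 + 100) 255) 0,
         max (min (p.2.2 + 100) 255) 0, (255 : Int)))) := by
  unfold makeimg5
  have hd0 : PySem.List.pyGetD d 0 ([] : List (Int × Int × Int)) = d.headD [] := by
    cases d with
    | nil => exact absurd rfl hne
    | cons x t => simp [PySem.List.pyGetD_zero_cons, List.headD]
  simp only [PySem.List.foldl_append_singleton_eq_map, List.nil_append, hd0,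
             PySem.List.pyRange_zero_nat, List.map_map]
  refine List.map_congr_left ?_
  intro k _
  simp only [Function.comp_def, PySem.List.pyGetD_natCast]
  have hrows : ∀ (g : List (Int × Int × Int) → (Int × Int × Int × Int)),
      (List.range d.length).map (fun j => g (d.getD j [])) = d.map g := by
    intro g
    apply List.ext_getElem
    · simp
    · intro i h1 h2
      rw [List.length_map] at h2
      simp [List.getD, List.getElem?_eq_getElem h2]
  exact hrows (fun row =>
    (max (min ((row.getD k (0, 0, 0)).1 + 100) 255) 0,
     max (min ((row.getD k (0, 0, 0)).2.1 + 100) 255) 0,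
     max (min ((row.getD k (0, 0, 0)).2.2 + 100) 255) 0, (255 : Int)))

-- pvZipStar on a rectangular-enough family is the column list.
theorem pvZipStar_eq_cols (w : Nat) :
    ∀ (ls : List (List (Int × Int × Int × Int))), ls ≠ [] →
      (∀ r ∈ ls, w ≤ r.length) → (ls.headD []).length = w →
      pvZipStar ls = (List.range w).map (fun k => ls.map (fun r => r.getD k (0, 0, 0, 0))) := by
  induction w with
  | zero =>
      intro ls hne _ hhd
      cases ls with
      | nil => exact absurd rfl hne
      | cons x t =>
          simp only [List.headD, List.length_eq_zero_iff] at hhd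
          rw [pvZipStar]
          simp [hhd]
  | succ w ih =>
      intro ls hne hall hhd
      have hnonempty : ∀ r ∈ ls, r ≠ [] := by
        intro r hr h
        have := hall r hr
        simp [h] at this
      rw [pvZipStar]
      rw [dif_neg]
      · have htl : pvZipStar (ls.map (List.drop 1))
            = (List.range w).map (fun k => (ls.map (List.drop 1)).map (fun r => r.getD k (0, 0, 0, 0))) := by
          apply ih
          · simp [hne]
          · intro r hr
            obtain ⟨r0, hr0, rfl⟩ := List.mem_map.mp hr
            have := hall r0 hr0
            rw [List.length_drop]
            omega
          · cases ls with
            | nil => exact absurd rfl hne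
            | cons x t =>
                simp only [List.map_cons, List.headD] at *
                rw [List.length_drop]
                omega
        rw [htl, List.range_succ_eq_map, List.map_cons, List.map_map]
        congr 1
        · refine List.map_congr_left ?_
          intro r hr
          cases r with
          | nil => exact absurd rfl (hnonempty _ hr)
          | cons a s => rfl
        · refine List.map_congr_left ?_
          intro k _
          simp only [Function.comp, List.map_map]
          refine List.map_congr_left ?_
          intro r hr
          cases r with
          | nil => exact absurd rfl (hnonempty _ hr)
          | cons a s => simp [List.drop]
      · simp only [not_or, List.any_eq_true, not_exists, not_and]
        exact ⟨hne, fun r hr => by simpa [List.isEmpty_iff] using hnonempty r hr⟩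

-- ===== VERDICT (by name: the statement is the Claim_ definition above) =====
theorem makeimg5_spec : Claim_equal_makeimg5 := by
  intro d _ hpre
  obtain ⟨hne, hall⟩ := hpre
  unfold Spec_makeimg5 makeimg5_alt
  set w := (d.headD []).length with hw
  have hB : (d.map fun row => row.map fun p => (pvClamp p.1, pvClamp p.2.1, pvClamp p.2.2, (255 : Int))) ≠ [] := by
    simp [hne]
  have hBall : ∀ r ∈ (d.map fun row => row.map fun p => (pvClamp p.1, pvClamp p.2.1, pvClamp p.2.2, (255 : Int))), w ≤ r.length := by
    intro r hr
    obtain ⟨r0, hr0, rfl⟩ := List.mem_map.mp hr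
    simpa using hall r0 hr0
  have hBhd : ((d.map fun row => row.map fun p => (pvClamp p.1, pvClamp p.2.1, pvClamp p.2.2, (255 : Int))).headD []).length = w := by
    cases d with
    | nil => exact absurd rfl hne
    | cons x t => simp [hw, List.headD]
  rw [pvZipStar_eq_cols w _ hB hBall hBhd, makeimg5_eq_cols d hne, ← hw]
  refine List.map_congr_left ?_
  intro k hk
  rw [List.mem_range] at hk
  rw [List.map_map]
  refine List.map_congr_left ?_
  intro row hrow
  have hkr : k < row.length := lt_of_lt_of_le hk (hall row hrow)
  simp only [Function.comp]
  have hkm : k < (row.map fun p => (pvClamp p.1, pvClamp p.2.1, pvClamp p.2.2, (255 : Int))).length := by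
    simpa using hkr
  rw [List.getD_eq_getElem _ _ hkm, List.getD_eq_getElem _ _ hkr]
  simp [pvClamp]
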